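-- pv_equiv track=rewrite | github.com/fwhong/cve_traffict-detect | cve_traffic-detect/detect_cve_final.py | extract_param_names
-- ===== SOURCE A (Python) =====
-- def extract_param_names(query_string):
--     """Fast parameter name extraction (replaces regex for performance)."""
--     if not query_string or '=' not in query_string:
--         return set()
--
--     params = set()
--     for pair in query_string.split('&'):
--         if '=' in pair:
--             param_name = pair.split('=', 1)[0]
--             if param_name:  # Skip empty parameter names
--                 params.add(param_name)
--     return params
-- ===== SOURCE B (Python) =====
-- def extract_param_names(query_string):
--     """One pass over the characters with a tiny state machine: no split(),
--     no per-segment substring work."""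
--     params = set()
--     name = ''       # characters of the current candidate parameter name
--     live = True     # still before the first '=' of the current segment
--     for c in query_string:
--         if c == '&':
--             name, live = '', True
--         elif c == '=':
--             if live and name:
--                 params.add(name)
--             name, live = '', False
--         elif live:
--             name += c
--     return params
-- ===== Notes on version B (the rewrite author's own statement) =====
-- stated objective: alternative
-- what changed: Replaces the split('&') / '=' in pair / pair.split('=',1)[0] per-segment parsing with a single character-level state-machine pass that accumulates the candidate name and adds it when the segment's first '=' is reached.
import Mathlib
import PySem

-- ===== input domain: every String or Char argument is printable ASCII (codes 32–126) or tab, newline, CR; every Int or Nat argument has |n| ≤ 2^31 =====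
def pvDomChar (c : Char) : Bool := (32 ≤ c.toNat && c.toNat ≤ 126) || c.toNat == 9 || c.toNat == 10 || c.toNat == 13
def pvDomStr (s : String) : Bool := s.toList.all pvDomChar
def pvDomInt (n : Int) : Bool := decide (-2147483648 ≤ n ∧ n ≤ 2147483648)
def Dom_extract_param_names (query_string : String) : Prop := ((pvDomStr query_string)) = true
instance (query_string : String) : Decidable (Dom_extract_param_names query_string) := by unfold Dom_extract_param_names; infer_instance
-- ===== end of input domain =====

-- B replaces A's split('&')/per-segment parsing by one character-level state-machine pass (alternative decomposition, same O(n) cost); return value only, neither mutates.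

-- ===== PORT A =====
def extract_param_names (query_string : String) : List String :=
  if query_string = "" ∨ PySem.Str.isIn "=" query_string = false then []
  else
    (PySem.Chars.splitOn query_string.toList ['&']).foldl
      (fun params pair =>
        if PySem.Chars.isIn ['='] pair then
          -- pair.split('=', 1)[0]: the split list is never empty, so [0] is its head
          let param_name := (PySem.Chars.splitOnMax pair ['='] 1).headD []
          if param_name ≠ [] then PySem.Set.add params (String.mk param_name) else params
        else params)
      PySem.Set.empty

-- ===== PORT B =====
def extract_param_names_alt (query_string : String) : List String :=
  (query_string.toList.foldl
    (fun (st : PySem.Set String × List Char × Bool) c =>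
      if c = '&' then (st.1, [], true)
      else if c = '=' then
        ((if st.2.2 ∧ st.2.1 ≠ [] then PySem.Set.add st.1 (String.mk st.2.1) else st.1), [], false)
      else if st.2.2 then (st.1, st.2.1 ++ [c], true)
      else st)
    (PySem.Set.empty, [], true)).1

-- ===== PRECONDITION & SPEC =====
def Spec_extract_param_names (query_string : String) (out : List String) : Prop := out = extract_param_names_alt query_string
instance (query_string : String) (out : List String) : Decidable (Spec_extract_param_names query_string out) := by unfold Spec_extract_param_names; infer_instance

-- ===== CLAIM (what is proved, stated in full; the proofs are below) =====
def Claim_equal_extract_param_names : Prop := ∀ (query_string : String), Dom_extract_param_names query_string → Spec_extract_param_names query_string (extract_param_names query_string)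

-- ===== LEMMAS AND PROOFS =====

def bodyA (params : PySem.Set String) (pair : List Char) : PySem.Set String :=
  if PySem.Chars.isIn ['='] pair then
    (if pair.takeWhile (fun c => c != '=') ≠ [] then
      PySem.Set.add params (String.mk (pair.takeWhile (fun c => c != '='))) else params)
  else params

def stepB (st : PySem.Set String × List Char × Bool) (c : Char) : PySem.Set String × List Char × Bool :=
  if c = '&' then (st.1, [], true)
  else if c = '=' then
    ((if st.2.2 ∧ st.2.1 ≠ [] then PySem.Set.add st.1 (String.mk st.2.1) else st.1), [], false)
  else if st.2.2 then (st.1, st.2.1 ++ [c], true)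
  else st

lemma isIn_single (a : Char) (s : List Char) : PySem.Chars.isIn [a] s = true ↔ a ∈ s := by
  rw [PySem.Chars.isIn_iff_infix, List.singleton_infix_iff]

lemma goMax0 (sep : Char) (fuel : Nat) (l cur : List Char) (accL : List (List Char)) :
    PySem.Chars.splitOnMax.go [sep] fuel 0 l cur accL = accL.reverse ++ [cur.reverse ++ l] := by
  cases fuel with
  | zero => simp [PySem.Chars.splitOnMax.go]
  | succ n => cases l with
    | nil => simp [PySem.Chars.splitOnMax.go]
    | cons c rest => simp [PySem.Chars.splitOnMax.go]

lemma goMax1 (sep : Char) (fuel : Nat) (l cur : List Char) (accL : List (List Char))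
    (h : l.length ≤ fuel) :
    PySem.Chars.splitOnMax.go [sep] fuel 1 l cur accL =
      accL.reverse ++ (match l.dropWhile (· != sep) with
        | [] => [cur.reverse ++ l]
        | _ :: r => [cur.reverse ++ l.takeWhile (· != sep), r]) := by
  induction fuel generalizing l cur accL with
  | zero =>
    have : l = [] := by cases l <;> simp_all
    subst this
    simp [PySem.Chars.splitOnMax.go]
  | succ n ih =>
    cases l with
    | nil => simp [PySem.Chars.splitOnMax.go]
    | cons c rest =>
      by_cases hc : c = sep
      · subst hc
        simp only [PySem.Chars.splitOnMax.go, List.isPrefixOf, BEq.rfl, Bool.and_eq_true,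
          List.isPrefixOf_nil_left, and_true]
        rw [if_neg (by omega)]
        simp only [beq_self_eq_true, if_true]
        rw [goMax0]
        simp [List.dropWhile_cons, List.takeWhile_cons]
      · have hpre : [sep].isPrefixOf (c :: rest) = false := by
          simp [List.isPrefixOf]; exact fun hh => (hc hh.symm).elim
        simp only [PySem.Chars.splitOnMax.go]
        rw [if_neg (by omega), hpre]
        simp only [Bool.false_eq_true, if_false]
        rw [ih rest (c :: cur) accL (by simpa using Nat.le_of_succ_le_succ (by simpa using h))]
        have hne : (c != sep) = true := by simp [hc]
        simp [List.dropWhile_cons, List.takeWhile_cons, hne]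
lemma headD_splitOnMax (sep : Char) (pair : List Char) :
    (PySem.Chars.splitOnMax pair [sep] 1).headD [] = pair.takeWhile (· != sep) := by
  unfold PySem.Chars.splitOnMax
  rw [if_neg (by omega)]
  norm_num
  rw [goMax1 sep (pair.length + 1) pair [] [] (by omega)]
  have hj : pair.takeWhile (· != sep) ++ pair.dropWhile (· != sep) = pair :=
    List.takeWhile_append_dropWhile
  cases hdw : pair.dropWhile (· != sep) with
  | nil =>
    simp only [List.reverse_nil, List.nil_append]
    rw [hdw, List.append_nil] at hj
    exact hj.symm
  | cons x r => simp

lemma goSplit (sep : Char) (fuel : Nat) (l cur : List Char) (accL : List (List Char))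
    (h : l.length ≤ fuel) :
    PySem.Chars.splitOn.go [sep] fuel l cur accL =
      accL.reverse ++ ((List.splitOnP (· == sep) l).modifyHead (cur.reverse ++ ·)) := by
  induction fuel generalizing l cur accL with
  | zero =>
    have : l = [] := by cases l <;> simp_all
    subst this
    simp [PySem.Chars.splitOn.go]
  | succ n ih =>
    cases l with
    | nil => simp [PySem.Chars.splitOn.go]
    | cons c rest =>
      by_cases hc : c = sep
      · subst hc
        simp only [PySem.Chars.splitOn.go, List.isPrefixOf, BEq.rfl, Bool.and_eq_true,
          and_true, if_true]
        have hdrop : List.drop [c].length (c :: rest) = rest := by simp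
        rw [hdrop, ih rest [] (cur.reverse :: accL) (by simpa using h)]
        simp only [List.splitOnP_cons, BEq.rfl, if_true]
        cases List.splitOnP (fun x => x == c) rest <;> simp
      · have hpre : [sep].isPrefixOf (c :: rest) = false := by
          simp [List.isPrefixOf]; exact fun hh => (hc hh.symm).elim
        simp only [PySem.Chars.splitOn.go, hpre, Bool.false_eq_true, if_false]
        rw [ih rest (c :: cur) accL (by simpa using h)]
        have : ((c :: rest).splitOnP (· == sep)) = (rest.splitOnP (· == sep)).modifyHead (c :: ·) := by
          simp [List.splitOnP_cons, hc]
        rw [this, List.modifyHead_modifyHead]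
        cases hsp : List.splitOnP (· == sep) rest <;> simp

lemma splitOn_eq (sep : Char) (l : List Char) :
    PySem.Chars.splitOn l [sep] = List.splitOnP (· == sep) l := by
  unfold PySem.Chars.splitOn
  rw [goSplit sep (l.length + 1) l [] [] (by omega)]
  cases hsp : List.splitOnP (· == sep) l <;> simp

lemma bodyA_no_eq {pair : List Char} (h : '=' ∉ pair) (p : PySem.Set String) : bodyA p pair = p := by
  have : PySem.Chars.isIn ['='] pair = false := by
    cases hx : PySem.Chars.isIn ['='] pair
    · rfl
    · exact absurd ((isIn_single _ _).1 hx) h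
  simp [bodyA, this]

lemma bodyA_with_eq {name rest : List Char} (h : '=' ∉ name) (p : PySem.Set String) :
    bodyA p (name ++ '=' :: rest) =
      if name ≠ [] then PySem.Set.add p (String.mk name) else p := by
  have hin : PySem.Chars.isIn ['='] (name ++ '=' :: rest) = true :=
    (isIn_single _ _).2 (by simp)
  have htw : (name ++ '=' :: rest).takeWhile (fun c => c != '=') = name := by
    rw [List.takeWhile_append]
    have : name.takeWhile (fun c => c != '=') = name := by
      rw [List.takeWhile_eq_self_iff]
      intro a ha
      have : a ≠ '=' := fun he => h (he ▸ ha)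
      simpa using this
    rw [this]
    simp
  simp [bodyA, hin, htw]

lemma modifyHead_nil_append {α : Type} (l : List (List α)) :
    List.modifyHead (fun x => [] ++ x) l = l := by
  cases l <;> simp

lemma fold_stepB (cs : List Char) :
    (∀ (p : PySem.Set String) (name : List Char),
        (List.foldl stepB (p, name, false) cs).1 =
          List.foldl bodyA p ((List.splitOnP (· == '&') cs).tail)) ∧
    (∀ (p : PySem.Set String) (name : List Char), '=' ∉ name →
        (List.foldl stepB (p, name, true) cs).1 =
          List.foldl bodyA p ((List.splitOnP (· == '&') cs).modifyHead (name ++ ·))) := by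
  induction cs with
  | nil =>
    constructor
    · intro p name; simp
    · intro p name h
      simp only [List.foldl_nil, List.splitOnP_nil, List.modifyHead_cons, List.foldl_cons,
        List.append_nil, List.foldl_nil]
      exact (bodyA_no_eq h p).symm
  | cons c rest ih =>
    obtain ⟨ihD, ihL⟩ := ih
    constructor
    · intro p name
      by_cases hc : c = '&'
      · subst hc
        have hstep : stepB (p, name, false) '&' = (p, [], true) := by simp [stepB]
        rw [List.foldl_cons, hstep, ihL p [] (by simp), modifyHead_nil_append]
        simp [List.splitOnP_cons]
      · have hsp : (c :: rest).splitOnP (· == '&') = (rest.splitOnP (· == '&')).modifyHead (c :: ·) := by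
          simp [List.splitOnP_cons, hc]
        have htail : ((rest.splitOnP (· == '&')).modifyHead (c :: ·)).tail = (rest.splitOnP (· == '&')).tail := by
          cases rest.splitOnP (· == '&') <;> simp
        have hstep : stepB (p, name, false) c = (p, (if c = '=' then [] else name), false) := by
          by_cases he : c = '=' <;> simp [stepB, hc, he]
        rw [List.foldl_cons, hstep, ihD p _, hsp, htail]
    · intro p name h
      by_cases hc : c = '&'
      · subst hc
        have hstep : stepB (p, name, true) '&' = (p, [], true) := by simp [stepB]
        rw [List.foldl_cons, hstep, ihL p [] (by simp), modifyHead_nil_append]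
        simp only [List.splitOnP_cons, BEq.rfl, if_true]
        have : ((([] : List Char) :: rest.splitOnP (· == '&')).modifyHead (name ++ ·)) =
            name :: rest.splitOnP (· == '&') := by simp
        rw [this, List.foldl_cons, bodyA_no_eq h p]
      · have hsp : (c :: rest).splitOnP (· == '&') = (rest.splitOnP (· == '&')).modifyHead (c :: ·) := by
          simp [List.splitOnP_cons, hc]
        obtain ⟨hd, tl, hht⟩ := List.exists_cons_of_ne_nil (List.splitOnP_ne_nil (· == '&') rest)
        by_cases he : c = '='
        · subst he
          have hstep : stepB (p, name, true) '=' =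
              ((if name ≠ [] then PySem.Set.add p (String.mk name) else p), [], false) := by
            simp [stepB]
          rw [List.foldl_cons, hstep, ihD _ [], hsp, hht]
          simp only [List.modifyHead_cons, List.tail_cons, List.foldl_cons]
          rw [bodyA_with_eq h p]
        · have hstep : stepB (p, name, true) c = (p, name ++ [c], true) := by
            simp [stepB, hc, he]
          rw [List.foldl_cons, hstep,
            ihL p (name ++ [c]) (by simp [he] at h ⊢; exact ⟨fun ha => h ha, fun hh => he hh.symm⟩),
            hsp, hht]
          simp

lemma fold_stepB_no_eq {cs : List Char} (h : '=' ∉ cs) (p : PySem.Set String)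
    (name : List Char) (live : Bool) :
    (List.foldl stepB (p, name, live) cs).1 = p := by
  induction cs generalizing p name live with
  | nil => rfl
  | cons c rest ih =>
    have hc : c ≠ '=' := fun he => h (he ▸ List.mem_cons_self ..)
    have hr : '=' ∉ rest := fun hm => h (List.mem_cons_of_mem _ hm)
    rw [List.foldl_cons]
    by_cases hamp : c = '&'
    · have hs : stepB (p, name, live) c = (p, [], true) := by simp [stepB, hamp]
      rw [hs]; exact ih hr _ _ _
    · cases live
      · have hs : stepB (p, name, false) c = (p, name, false) := by simp [stepB, hamp, hc]
        rw [hs]; exact ih hr _ _ _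
      · have hs : stepB (p, name, true) c = (p, name ++ [c], true) := by simp [stepB, hamp, hc]
        rw [hs]; exact ih hr _ _ _

-- ===== VERDICT (by name: the statement is the Claim_ definition above) =====
theorem extract_param_names_spec : Claim_equal_extract_param_names := by
  intro q _
  unfold Spec_extract_param_names extract_param_names extract_param_names_alt
  by_cases h1 : q = ""
  · subst h1; simp
  · by_cases h2 : PySem.Str.isIn "=" q = false
    · rw [if_pos (Or.inr h2)]
      have hne : '=' ∉ q.toList := by
        intro hm
        rw [show PySem.Str.isIn "=" q = PySem.Chars.isIn "=".toList q.toList from rfl] at h2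
        exact absurd ((isIn_single '=' q.toList).2 hm) (by simpa using h2)
      exact (fold_stepB_no_eq hne PySem.Set.empty [] true).symm
    · rw [if_neg (by push_neg; exact ⟨h1, by simpa using h2⟩)]
      have hB := (fold_stepB q.toList).2 PySem.Set.empty [] (by simp)
      rw [show (List.foldl
          (fun (st : PySem.Set String × List Char × Bool) c =>
            if c = '&' then (st.1, [], true)
            else if c = '=' then
              ((if st.2.2 ∧ st.2.1 ≠ [] then PySem.Set.add st.1 (String.mk st.2.1) else st.1), [], false)
            else if st.2.2 then (st.1, st.2.1 ++ [c], true)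
            else st)
          (PySem.Set.empty, [], true) q.toList) = List.foldl stepB (PySem.Set.empty, [], true) q.toList from rfl]
      rw [hB, modifyHead_nil_append, splitOn_eq]
      congr 1
      funext params pair
      simp only [bodyA, headD_splitOnMax]
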